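-- pv_equiv track=rewrite | github.com/Leoberium/BA | Chapter11/BA11D.py | vector_to_peptide
-- ===== SOURCE A (Python) =====
-- mass_to_aa = {
--     57: ['G'], 71: ['A'], 87: ['S'], 97: ['P'],
--     99: ['V'], 101: ['T'], 103: ['C'], 113: ['L', 'I'],
--     114: ['N'], 115: ['D'], 128: ['K', 'Q'], 129: ['E'],
--     131: ['M'], 137: ['H'], 147: ['F'], 156: ['R'],
--     163: ['Y'], 186: ['W'], 4: ['X'], 5: ['Z']
-- }
--
-- def vector_to_peptide(p):
--     n = len(p)
--     cnt = 0
--     peptide = ''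
--     for i in range(n):
--         cnt += 1
--         if p[i] == 1:
--             peptide += mass_to_aa[cnt][0]
--             cnt = 0
--     return peptide
-- ===== SOURCE B (Python) =====
-- mass_to_aa = {
--     57: ['G'], 71: ['A'], 87: ['S'], 97: ['P'],
--     99: ['V'], 101: ['T'], 103: ['C'], 113: ['L', 'I'],
--     114: ['N'], 115: ['D'], 128: ['K', 'Q'], 129: ['E'],
--     131: ['M'], 137: ['H'], 147: ['F'], 156: ['R'],
--     163: ['Y'], 186: ['W'], 4: ['X'], 5: ['Z']
-- }
--
-- def vector_to_peptide(p):
--     out = []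
--     prev = -1
--     while True:
--         try:
--             i = p.index(1, prev + 1)
--         except ValueError:
--             return ''.join(out)
--         out.append(mass_to_aa[i - prev][0])
--         prev = i
-- ===== Notes on version B (the rewrite author's own statement) =====
-- stated objective: alternative
-- what changed: Replaces A's element-by-element pass with a reset counter and string concatenation by a jump loop that list.index-searches for the next 1-marker, takes the distance from the previous marker as the amino-acid mass, and joins the collected letters at the end.
import Mathlib
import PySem

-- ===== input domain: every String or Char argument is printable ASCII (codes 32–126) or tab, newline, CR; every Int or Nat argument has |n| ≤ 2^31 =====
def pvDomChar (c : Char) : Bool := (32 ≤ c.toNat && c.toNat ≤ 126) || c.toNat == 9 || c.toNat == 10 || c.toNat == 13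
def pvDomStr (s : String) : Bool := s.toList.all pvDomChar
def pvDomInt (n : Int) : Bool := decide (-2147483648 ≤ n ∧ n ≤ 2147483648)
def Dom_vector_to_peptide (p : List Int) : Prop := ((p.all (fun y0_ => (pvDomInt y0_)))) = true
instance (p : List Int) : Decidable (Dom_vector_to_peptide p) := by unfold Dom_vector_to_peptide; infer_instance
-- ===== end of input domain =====

-- B replaces A's element-by-element reset-counter pass by a loop that index-searches for the
-- next 1-marker and maps the distance between consecutive markers (objective: alternative
-- decomposition, same cost); equal return values on Pre_.

-- mass_to_aa[m][0] as an Option lookup; none = KeyError (shared module constant of both programs)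
def massToAA (m : Int) : Option Char :=
  if m = 57 then some 'G' else if m = 71 then some 'A' else if m = 87 then some 'S'
  else if m = 97 then some 'P' else if m = 99 then some 'V' else if m = 101 then some 'T'
  else if m = 103 then some 'C' else if m = 113 then some 'L' else if m = 114 then some 'N'
  else if m = 115 then some 'D' else if m = 128 then some 'K' else if m = 129 then some 'E'
  else if m = 131 then some 'M' else if m = 137 then some 'H' else if m = 147 then some 'F'
  else if m = 156 then some 'R' else if m = 163 then some 'Y' else if m = 186 then some 'W'
  else if m = 4 then some 'X' else if m = 5 then some 'Z' else none

-- ===== PORT A =====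
-- loop body; state none = a KeyError was raised (Pre_ excludes those inputs)
def aStep (s : Option (Int × String)) (x : Int) : Option (Int × String) :=
  match s with
  | none => none
  | some (cnt, pep) =>
      if x = 1 then
        match massToAA (cnt + 1) with
        | some c => some (0, pep.push c)
        | none => none
      else some (cnt + 1, pep)

-- 'for i in range(n): … p[i] …' visits exactly the elements of p in order
def vector_to_peptide (p : List Int) : String :=
  match p.foldl aStep (some (0, "")) with
  | some s => s.2
  | none => ""   -- unreachable under Pre_ (Python raises KeyError there)

-- ===== PORT B =====
-- the while-True loop of Source B: rest = p[prev+1:]; p.index(1, prev+1) = position of the first 1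
-- in rest, the gap i - prev is that position + 1; ValueError (no further 1) ends the loop
def bLoop (rest : List Int) (out : List Char) : List Char :=
  match _h : PySem.List.index? rest 1 with
  | none => out
  | some j =>
      match massToAA ((j : Int) + 1) with
      | some c => bLoop (rest.drop (j + 1)) (out ++ [c])
      | none => out   -- unreachable under Pre_ (Python raises KeyError there)
  termination_by rest.length
  decreasing_by
    obtain ⟨hk, -, -⟩ := PySem.List.getElem_of_index?_eq_some _h
    simp only [List.length_drop]
    omega

-- ''.join(out)
def vector_to_peptide_alt (p : List Int) : String := String.ofList (bLoop p [])

-- ===== PRECONDITION & SPEC =====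
-- the distances between consecutive 1-markers in p (previous marker starting at index -1)
def gapList : List Int → Int → List Int
  | [], _ => []
  | x :: t, c => if x = 1 then (c + 1) :: gapList t 0 else gapList t (c + 1)

-- Pre_ excludes inputs where some inter-marker distance is not a key of mass_to_aa: there A raises KeyError.
def Pre_vector_to_peptide (p : List Int) : Prop := ∀ g ∈ gapList p 0, (massToAA g).isSome

instance (p : List Int) : Decidable (Pre_vector_to_peptide p) := by
  unfold Pre_vector_to_peptide; infer_instance

def pvWitness_vector_to_peptide : List Int := [0, 0, 0, 1, 0, 0, 0, 0, 1]

def Spec_vector_to_peptide (p : List Int) (out : String) : Prop := out = vector_to_peptide_alt p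
instance (p : List Int) (out : String) : Decidable (Spec_vector_to_peptide p out) := by unfold Spec_vector_to_peptide; infer_instance

-- ===== CLAIM (what is proved, stated in full; the proofs are below) =====
def Claim_equal_vector_to_peptide : Prop := ∀ (p : List Int), Dom_vector_to_peptide p → Pre_vector_to_peptide p → Spec_vector_to_peptide p (vector_to_peptide p)

-- ===== LEMMAS AND PROOFS =====

theorem push_ofList (pep : String) (c : Char) (l : List Char) :
    pep.push c ++ String.ofList l = pep ++ String.ofList (c :: l) := by
  apply String.ext; simp

-- A's loop, started at counter c, appends exactly the letters of the gaps gapList p c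
theorem foldA (p : List Int) : ∀ (c : Int) (pep : String),
    (∀ g ∈ gapList p c, (massToAA g).isSome) →
    ∃ c', p.foldl aStep (some (c, pep)) =
      some (c', pep ++ String.ofList ((gapList p c).filterMap massToAA)) := by
  induction p with
  | nil => intro c pep _; exact ⟨c, by simp [gapList]⟩
  | cons x t ih =>
    intro c pep h
    by_cases hx : x = 1
    · have h1 : (massToAA (c + 1)).isSome := by
        apply h; simp [gapList, hx]
      obtain ⟨ch, hch⟩ := Option.isSome_iff_exists.mp h1
      have ht : ∀ g ∈ gapList t 0, (massToAA g).isSome := by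
        intro g hg; apply h; simp [gapList, hx, hg]
      obtain ⟨c', hc'⟩ := ih 0 (pep.push ch) ht
      refine ⟨c', ?_⟩
      simp only [List.foldl_cons, aStep, hx, hch, gapList, if_true]
      rw [hc', push_ofList]
      simp [hch]
    · have ht : ∀ g ∈ gapList t (c + 1), (massToAA g).isSome := by
        intro g hg; apply h; simp [gapList, hx, hg]
      obtain ⟨c', hc'⟩ := ih (c + 1) pep ht
      refine ⟨c', ?_⟩
      simp only [List.foldl_cons, aStep, hx, gapList, if_false]
      exact hc'

-- gapList through the next-marker search: no 1 means no gaps; the first 1 at position j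
-- contributes the gap c + j + 1 and the rest are the gaps of the suffix after it
theorem gapList_index_none (p : List Int) : ∀ (c : Int),
    PySem.List.index? p 1 = none → gapList p c = [] := by
  induction p with
  | nil => intro c _; simp [gapList]
  | cons x t ih =>
    intro c h
    rw [PySem.List.index?_eq_none_iff] at h
    have hx : x ≠ 1 := by intro hx; exact h (by simp [hx])
    have ht : PySem.List.index? t 1 = none := by
      rw [PySem.List.index?_eq_none_iff]
      intro hm; exact h (by simp [hm])
    simp [gapList, hx, ih (c + 1) ht]

theorem gapList_index_some (p : List Int) : ∀ (c : Int) (j : Nat),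
    PySem.List.index? p 1 = some j →
    gapList p c = (c + (j : Int) + 1) :: gapList (p.drop (j + 1)) 0 := by
  induction p with
  | nil => intro c j h; simp [PySem.List.index?] at h
  | cons x t ih =>
    intro c j h
    by_cases hx : x = 1
    · subst hx
      rw [PySem.List.index?_cons_self] at h
      obtain rfl : j = 0 := by simpa using h.symm
      simp [gapList]
    · rw [PySem.List.index?_cons_of_ne t hx] at h
      obtain ⟨j', hj', rfl⟩ := Option.map_eq_some_iff.mp h
      have := ih (c + 1) j' hj'
      simp only [gapList, hx, if_false, List.drop_succ_cons]
      rw [this]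
      congr 2
      push_cast; ring
  

theorem index?_nil_one : PySem.List.index? ([] : List Int) 1 = none := by
  rw [PySem.List.index?_eq_none_iff]; simp

theorem bLoop_none (rest : List Int) (out : List Char)
    (h : PySem.List.index? rest 1 = none) : bLoop rest out = out := by
  rw [bLoop.eq_def]
  split
  · rfl
  · rename_i j hj
    rw [h] at hj
    simp at hj

theorem bLoop_some (rest : List Int) (out : List Char) (j : Nat) (c : Char)
    (h1 : PySem.List.index? rest 1 = some j) (h2 : massToAA ((j : Int) + 1) = some c) :
    bLoop rest out = bLoop (rest.drop (j + 1)) (out ++ [c]) := by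
  rw [bLoop.eq_def]
  split
  · rename_i hj; rw [h1] at hj; simp at hj
  · rename_i j' hj'
    rw [h1] at hj'
    obtain rfl : j' = j := by simpa using hj'.symm
    rw [h2]

-- B's loop produces out followed by the letters of the suffix's gaps
theorem bLoop_eq (n : Nat) : ∀ (rest : List Int), rest.length ≤ n → ∀ (out : List Char),
    (∀ g ∈ gapList rest 0, (massToAA g).isSome) →
    bLoop rest out = out ++ (gapList rest 0).filterMap massToAA := by
  induction n with
  | zero =>
    intro rest hlen out _
    have : rest = [] := List.eq_nil_of_length_eq_zero (by omega)
    subst this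
    rw [bLoop_none _ _ index?_nil_one]
    simp [gapList]
  | succ n ih =>
    intro rest hlen out h
    match hidx : PySem.List.index? rest 1 with
    | none =>
      rw [bLoop_none _ _ hidx, gapList_index_none rest 0 hidx]
      simp
    | some j =>
      have hg := gapList_index_some rest 0 j hidx
      have h1 : (massToAA ((j : Int) + 1)).isSome := by
        apply h; rw [hg]; simp
      obtain ⟨ch, hch⟩ := Option.isSome_iff_exists.mp h1
      obtain ⟨hk, -, -⟩ := PySem.List.getElem_of_index?_eq_some hidx
      have hlen' : (rest.drop (j + 1)).length ≤ n := by
        simp only [List.length_drop]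
        omega
      have ht : ∀ g ∈ gapList (rest.drop (j + 1)) 0, (massToAA g).isSome := by
        intro g hgm; apply h; rw [hg]; simp [hgm]
      rw [bLoop_some _ _ _ _ hidx hch, ih _ hlen' _ ht, hg]
      simp [hch]

-- ===== VERDICT (by name: the statement is the Claim_ definition above) =====
theorem vector_to_peptide_spec : Claim_equal_vector_to_peptide := by
  intro p _ hpre
  unfold Spec_vector_to_peptide vector_to_peptide vector_to_peptide_alt
  obtain ⟨c', hc'⟩ := foldA p 0 "" hpre
  rw [hc', bLoop_eq p.length p le_rfl [] hpre]
  simp
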